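-- pv_equiv track=rewrite | github.com/rgoshen/CS340Project | data_helpers.py | bucket_categories
-- ===== SOURCE A (Python) =====
-- from collections import Counter
--
-- def bucket_categories(
--     values: list[str],
--     top_n: int = 10
-- ) -> dict[str, str]:
--     """Group low-frequency categories into 'Other' bucket.
--
--     Creates top N categories and groups remaining values as "Other"
--     for cleaner dashboard visualizations. Uses deterministic alphabetical
--     tie-breaking when categories have equal counts.
--
--     Args:
--         values: List of category values (e.g., breeds, colors)
--         top_n: Number of top categories to keep (default: 10)
--
--     Returns:
--         Dictionary mapping original values to bucketed values
--         (either original value or "Other")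
--
--     Examples:
--         >>> values = ["Dog", "Dog", "Cat", "Cat", "Bird", "Fish"]
--         >>> bucket_categories(values, top_n=2)
--         {'Dog': 'Dog', 'Cat': 'Cat', 'Bird': 'Other', 'Fish': 'Other'}
--     """
--     if not values or top_n <= 0:
--         return {}
--
--     # Count occurrences
--     counts = Counter(values)
--
--     # Get top N categories with deterministic tie-breaking
--     # Sort by count (descending), then alphabetically for ties
--     top_categories = sorted(
--         counts.items(),
--         key=lambda x: (-x[1], x[0])
--     )[:top_n]
--
--     # Create set of top category names
--     top_names = {cat[0] for cat in top_categories}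
--
--     # Create mapping: top categories map to themselves, others to "Other"
--     mapping = {}
--     for value in values:
--         if value in top_names:
--             mapping[value] = value
--         else:
--             mapping[value] = 'Other'
--
--     return mapping
-- ===== SOURCE B (Python) =====
-- from collections import Counter
--
--
-- def bucket_categories(values: list[str], top_n: int = 10) -> dict[str, str]:
--     """Rank-by-counting: instead of sorting and slicing a top-N list, decide
--     each distinct category directly — it keeps its name iff fewer than top_n
--     other categories strictly beat it under (higher count, then earlier
--     alphabetically). No sort, no slice, no set of top names."""
--     if not values or top_n <= 0:
--         return {}
--
--     counts = Counter(values)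
--     mapping = {}
--     for cat, c in counts.items():
--         beats = 0
--         for name, k in counts.items():
--             if k > c or (k == c and name < cat):
--                 beats += 1
--         mapping[cat] = cat if beats < top_n else 'Other'
--     return mapping
-- ===== Notes on version B (the rewrite author's own statement) =====
-- stated objective: alternative
-- what changed: B drops A's sort-slice-set pipeline (sort all categories by (-count,name), slice the top_n, build a top-name set, then label every element of values) and instead ranks each distinct category directly: a category keeps its name iff fewer than top_n categories strictly beat it under (higher count, then earlier name), computed by a counting scan over the distinct categories; no sort, no slice, no set.
import Mathlib
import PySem

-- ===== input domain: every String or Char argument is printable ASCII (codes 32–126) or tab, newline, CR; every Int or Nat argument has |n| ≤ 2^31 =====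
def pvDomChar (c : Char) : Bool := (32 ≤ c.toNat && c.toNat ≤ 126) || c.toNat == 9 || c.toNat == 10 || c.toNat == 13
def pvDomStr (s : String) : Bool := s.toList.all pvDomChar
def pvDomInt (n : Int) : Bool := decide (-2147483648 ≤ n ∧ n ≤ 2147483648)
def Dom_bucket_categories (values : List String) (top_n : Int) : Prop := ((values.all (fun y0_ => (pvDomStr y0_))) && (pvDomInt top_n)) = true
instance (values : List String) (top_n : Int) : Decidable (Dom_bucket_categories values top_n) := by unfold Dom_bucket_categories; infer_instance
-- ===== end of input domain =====

-- B replaces A's sort-and-slice top-N selection and per-element labelling loop by a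
-- direct rank computation over the distinct categories: a category keeps its name iff
-- fewer than top_n categories strictly beat it under (higher count, then earlier name);
-- return values are proved identical (objective: alternative algorithm, no sort).

-- ===== PORT A =====
def bucket_categories (values : List String) (top_n : Int) : List (String × String) :=
  if values = [] ∨ top_n ≤ 0 then []
  else
    let counts := PySem.Dict.counter values
    let top_categories :=
      PySem.List.slice (PySem.List.sorted2 counts.items (fun x => -x.2) (fun x => x.1)) none (some top_n)
    let top_names : PySem.Set String := PySem.Set.ofList (top_categories.map (fun cat => cat.1))
    let mapping := values.foldl
      (fun m value =>
        if PySem.Set.contains top_names value then m.insert value value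
        else m.insert value "Other")
      PySem.Dict.empty
    mapping.items

-- ===== PORT B =====
def bucket_categories_alt (values : List String) (top_n : Int) : List (String × String) :=
  if values = [] ∨ top_n ≤ 0 then []
  else
    let counts := PySem.Dict.counter values
    let mapping := counts.items.foldl
      (fun m p =>
        let beats := counts.items.foldl
          (fun acc q => if q.2 > p.2 ∨ (q.2 = p.2 ∧ q.1 < p.1) then acc + 1 else acc) (0 : Int)
        m.insert p.1 (if beats < top_n then p.1 else "Other"))
      PySem.Dict.empty
    mapping.items

-- ===== PRECONDITION & SPEC =====
def Spec_bucket_categories (values : List String) (top_n : Int) (out : List (String × String)) : Prop := out = bucket_categories_alt values top_n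
instance (values : List String) (top_n : Int) (out : List (String × String)) : Decidable (Spec_bucket_categories values top_n out) := by unfold Spec_bucket_categories; infer_instance

-- ===== CLAIM (what is proved, stated in full; the proofs are below) =====
def Claim_equal_bucket_categories : Prop := ∀ (values : List String) (top_n : Int), Dom_bucket_categories values top_n → Spec_bucket_categories values top_n (bucket_categories values top_n)

-- ===== LEMMAS AND PROOFS =====

-- the lexicographic sort key A uses: (-count, name)
def pvKey (p : String × Int) : Lex (Int × String) := toLex (-p.2, p.1)

-- A's two-key sort IS the sort by the single lexicographic key pvKey
theorem sorted2_eq_sorted_pvKey (xs : List (String × Int)) :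
    PySem.List.sorted2 xs (fun x => -x.2) (fun x => x.1) false
      = PySem.List.sorted xs pvKey false := by
  unfold PySem.List.sorted2 PySem.List.sorted
  simp only [Bool.false_eq_true, if_false]
  have hcmp : (fun (a b : String × Int) =>
        decide ((fun x : String × Int => -x.2) a < (fun x : String × Int => -x.2) b) ||
          (!decide ((fun x : String × Int => -x.2) b < (fun x : String × Int => -x.2) a) &&
            decide ((fun x : String × Int => x.1) a < (fun x : String × Int => x.1) b)))
      = fun a b => decide (pvKey a < pvKey b) := by
    funext a b
    simp only [pvKey, Prod.Lex.toLex_lt_toLex]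
    rcases lt_trichotomy a.2 b.2 with h | h | h <;>
      simp [h, not_lt_of_gt] <;> omega
  rw [hcmp]

-- membership in the first n elements of a strictly key-increasing list
-- is "fewer than n elements have a smaller key"
theorem mem_take_iff_countP_lt {α κ : Type} [LinearOrder κ] (key : α → κ)
    (L : List α) (hp : L.Pairwise (fun a b => key a < key b))
    (p : α) (hpL : p ∈ L) (n : Nat) :
    p ∈ L.take n ↔ L.countP (fun q => decide (key q < key p)) < n := by
  induction L generalizing n with
  | nil => cases hpL
  | cons x t ih =>
      have hx : ∀ y ∈ t, key x < key y := (List.pairwise_cons.mp hp).1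
      have ht : t.Pairwise (fun a b => key a < key b) := (List.pairwise_cons.mp hp).2
      rcases List.mem_cons.mp hpL with rfl | hpt
      · have h0 : t.countP (fun q => decide (key q < key p)) = 0 := by
          apply List.countP_eq_zero.mpr
          intro q hq
          simp [not_lt_of_gt (hx q hq)]
        cases n with
        | zero => simp [h0]
        | succ m => simp [List.take_succ_cons, h0]
      · have hkxp : key x < key p := hx p hpt
        have hpx : p ≠ x := by
          intro h; subst h; exact absurd hkxp (lt_irrefl _)
        cases n with
        | zero => simp
        | succ m =>
            have hc : List.countP (fun q => decide (key q < key p)) (x :: t)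
                = List.countP (fun q => decide (key q < key p)) t + 1 := by
              rw [List.countP_cons]; simp [hkxp]
            rw [List.take_succ_cons, List.mem_cons, hc, ih ht hpt m]
            constructor
            · rintro (h | h)
              · exact absurd h hpx
              · omega
            · intro h; right; omega

-- final lookup of a fold that inserts a key-determined value for every element
theorem getD_foldl_insert_fn (f : String → String) (xs : List String)
    (d : PySem.Dict String String) (k dflt : String) :
    (xs.foldl (fun m v => m.insert v (f v)) d).getD k dflt
      = if k ∈ xs then f k else d.getD k dflt := by
  induction xs generalizing d with
  | nil => simp
  | cons x xs ih =>
      simp only [List.foldl_cons, ih, PySem.Dict.getD_insert, List.mem_cons]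
      by_cases hx : k ∈ xs <;> by_cases he : k = x <;> simp [hx, he]

-- ===== VERDICT (by name: the statement is the Claim_ definition above) =====
theorem bucket_categories_spec : Claim_equal_bucket_categories := by
  unfold Claim_equal_bucket_categories
  intro values top_n _
  unfold Spec_bucket_categories bucket_categories bucket_categories_alt
  by_cases hg : values = [] ∨ top_n ≤ 0
  · simp [hg]
  · simp only [hg, ite_false]
    have hvne : values ≠ [] := fun h => hg (Or.inl h)
    have htn : 0 < top_n := by omega
    set K : List String := PySem.Set.ofList values with hK
    have hnodupK : K.Nodup := PySem.Set.nodup_ofList values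
    set items := (PySem.Dict.counter (κ := String) values).items with hitems
    have hitems_eq : items = K.map (fun k => (k, (values.count k : Int))) := by
      rw [hitems, PySem.Dict.items_counter]
    -- the sorted list, as a single-key sort
    set L := PySem.List.sorted items pvKey false with hL
    have hLdef : PySem.List.sorted2 items (fun x => -x.2) (fun x => x.1) false = L :=
      sorted2_eq_sorted_pvKey items
    have hperm : L.Perm items := PySem.List.sorted_perm items pvKey false
    -- L is strictly increasing under pvKey
    have hinj : Function.Injective pvKey := by
      intro a b hab
      have := toLex.injective hab
      have h1 : -a.2 = -b.2 := congrArg Prod.fst this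
      have h2 : a.1 = b.1 := congrArg Prod.snd this
      exact Prod.ext h2 (by omega)
    have hnodupL : L.Nodup := by
      refine hperm.nodup_iff.mpr ?_
      rw [hitems_eq]
      have hinj2 : Function.Injective (fun k : String => (k, (values.count k : Int))) :=
        fun a b hab => congrArg Prod.fst hab
      exact hnodupK.map hinj2
    have hpairL : L.Pairwise (fun a b => pvKey a < pvKey b) := by
      have hle : L.Pairwise (fun a b => pvKey a ≤ pvKey b) :=
        PySem.List.sorted_pairwise items pvKey
      have := hle.and hnodupL
      exact this.imp (fun {a b} h => lt_of_le_of_ne h.1 (fun he => h.2 (hinj he)))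
    -- the take-count bridge, per distinct category
    have hkey : ∀ k ∈ K, (k, (values.count k : Int)) ∈ items := by
      intro k hk; rw [hitems_eq]; exact List.mem_map_of_mem hk
    -- A's branching body as a single insert of a key-determined value
    have hfun : ∀ (T : PySem.Set String), (fun (m : PySem.Dict String String) value =>
        if PySem.Set.contains T value then m.insert value value
        else m.insert value "Other")
        = fun m value => m.insert value
            (if PySem.Set.contains T value then value else "Other") := by
      intro T; funext m v; split <;> rfl
    rw [hfun]
    set T : List String :=
      (PySem.List.slice (PySem.List.sorted2 items (fun x => -x.2) (fun x => x.1) false)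
        none (some top_n)).map (fun cat => cat.1) with hT
    -- A's items: keys are K, values looked up
    set fA : String → String :=
      fun v => if PySem.Set.contains (PySem.Set.ofList T) v then v else "Other" with hfA
    set dA := values.foldl (fun m v => m.insert v (fA v)) PySem.Dict.empty with hdA
    have hkA : dA.keys = K := by
      rw [hdA, PySem.Dict.keys_foldl_insert values (fun _ v => fA v) PySem.Dict.empty]
      rw [PySem.Dict.keys_empty, PySem.Set.update_nil_left]
    have hAitems : dA.items = K.map (fun k => (k, fA k)) := by
      rw [PySem.Dict.items_eq_map_keys dA (hkA ▸ hnodupK) "Other", hkA]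
      apply List.map_congr_left
      intro k hkK
      have hkvals : k ∈ values := (PySem.Set.mem_ofList values k).mp hkK
      rw [hdA, getD_foldl_insert_fn]
      simp [hkvals]
    -- B's items: a fold over fresh distinct keys appends
    set gB : String × Int → String := fun p =>
      if (items.foldl (fun acc q =>
            if q.2 > p.2 ∨ (q.2 = p.2 ∧ q.1 < p.1) then acc + 1 else acc) (0 : Int)) < top_n
      then p.1 else "Other" with hgB
    have hmapfst : items.map (fun p : String × Int => p.1) = K := by
      rw [hitems_eq, List.map_map]
      have hid : ((fun p : String × Int => p.1) ∘ (fun k => (k, (values.count k : Int)))) = id := rfl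
      rw [hid, List.map_id]
    have hBitems :
        (items.foldl (fun m p => m.insert p.1 (gB p)) PySem.Dict.empty).items
          = items.map (fun p => (p.1, gB p)) := by
      rw [PySem.Dict.items_foldl_insert_fresh items (fun p => p.1) gB PySem.Dict.empty
        (by intro a _; exact PySem.Dict.contains_empty _) (hmapfst ▸ hnodupK)]
      rw [show (PySem.Dict.empty : PySem.Dict String String).items = [] from rfl, List.nil_append]
    rw [hAitems, hBitems, hitems_eq, List.map_map]
    apply List.map_congr_left
    intro k hkK
    simp only [Function.comp_apply]
    have hitem : (k, (values.count k : Int)) ∈ items := hkey k hkK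
    have hitemL : (k, (values.count k : Int)) ∈ L := hperm.mem_iff.mpr hitem
    -- the beats condition is the pvKey comparison
    have hcond : ∀ q : String × Int,
        (q.2 > (values.count k : Int) ∨ (q.2 = (values.count k : Int) ∧ q.1 < k))
          ↔ pvKey q < pvKey (k, (values.count k : Int)) := by
      intro q
      unfold pvKey
      rw [Prod.Lex.toLex_lt_toLex]
      constructor
      · rintro (h | ⟨h1, h2⟩)
        · exact Or.inl (by omega)
        · exact Or.inr ⟨by omega, h2⟩
      · rintro (h | ⟨h1, h2⟩)
        · exact Or.inl (by omega)
        · exact Or.inr ⟨by omega, h2⟩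
    -- the count of beating categories
    have hbeats : (items.foldl (fun acc q =>
          if q.2 > (values.count k : Int) ∨ (q.2 = (values.count k : Int) ∧ q.1 < k)
          then acc + 1 else acc) (0 : Int))
        = (L.countP (fun q => decide (pvKey q < pvKey (k, (values.count k : Int)))) : Int) := by
      rw [PySem.List.foldl_ite_add_one
        (fun q => q.2 > (values.count k : Int) ∨ (q.2 = (values.count k : Int) ∧ q.1 < k)) items 0]
      rw [zero_add]
      congr 1
      rw [← hperm.countP_eq]
      apply List.countP_congr
      intro q _
      simp only [decide_eq_true_eq]; exact hcond q
    -- membership in T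
    have hTmem : k ∈ T ↔ (k, (values.count k : Int)) ∈ L.take top_n.toNat := by
      rw [hT, hLdef]
      have htn' : top_n = ((top_n.toNat : Nat) : Int) := (Int.toNat_of_nonneg (by omega)).symm
      rw [htn', PySem.List.slice_to_natCast]
      constructor
      · intro hk
        rcases List.mem_map.mp hk with ⟨q, hq, hq1⟩
        have hqL : q ∈ L := List.mem_of_mem_take hq
        have hqitems : q ∈ items := hperm.mem_iff.mp hqL
        rw [hitems_eq] at hqitems
        rcases List.mem_map.mp hqitems with ⟨k', _, hk'⟩
        have : q = (k, (values.count k : Int)) := by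
          subst hk'
          simp only [← hq1]
        rwa [this] at hq
      · intro hk
        exact List.mem_map.mpr ⟨_, hk, rfl⟩
    simp only [hfA, hgB, hbeats]
    by_cases hmem : (k, (values.count k : Int)) ∈ L.take top_n.toNat
    · have hcount := (mem_take_iff_countP_lt pvKey L hpairL _ hitemL top_n.toNat).mp hmem
      have hTk : k ∈ T := hTmem.mpr hmem
      have h2 : ((L.countP (fun q => decide (pvKey q < pvKey (k, (values.count k : Int))))) : Int) < top_n := by
        omega
      simp [PySem.Set.mem_ofList, hTk, h2]
    · have hcount := (mem_take_iff_countP_lt pvKey L hpairL _ hitemL top_n.toNat).not.mp hmem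
      have hTk : k ∉ T := fun h => hmem (hTmem.mp h)
      have h2 : ¬ ((L.countP (fun q => decide (pvKey q < pvKey (k, (values.count k : Int))))) : Int) < top_n := by
        omega
      simp [PySem.Set.mem_ofList, hTk, h2]
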